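-- pv_equiv track=rewrite | github.com/marciofcruz/rpa | ExtairGFD/ExtairGFD.py | get_nome_arquivo_categoria
-- ===== SOURCE A (Python) =====
-- def get_nome_arquivo_categoria(numero_pagina, texto):
--
--   linhas = texto.split('\n')
--
--   vencimento = ''
--   cnpj_primeiro = ''
--   cnpj_ultimo = ''
--   cnpj = ''
--
--   cont_linha = 0
--   for linha in linhas:
--     elementos = linha.split(' ')
--
--     if cont_linha==1:
--       vencimento = elementos[0]
--     else:
--       auxiliar = elementos[1]
--       auxiliar = auxiliar.upper()
--
--       if auxiliar.find('TRABALHADORES')>=0: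
--         cnpj = auxiliar[-7:].strip()
--
--         cnpj = cnpj.replace('-','')
--
--         if cnpj.isdigit():
--           if cnpj_primeiro == '':
--             cnpj_primeiro = cnpj
--             cnpj_ultimo = cnpj
--           else:
--             cnpj_ultimo = cnpj
--
--     cont_linha+=1
--
--   nome_arquivo = 'Relação de Categorias '+vencimento.replace('/','-')+' '+cnpj_primeiro+' a '+cnpj_ultimo+ '.pdf'
--
--   return nome_arquivo
-- ===== SOURCE B (Python) =====
-- def get_nome_arquivo_categoria(numero_pagina, texto):
--     linhas = texto.split('\n')
--     vencimento = linhas[1].split(' ')[0] if len(linhas) > 1 else ''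
--
--     def cnpj_de(linha):
--         aux = linha.split(' ')[1].upper()
--         if 'TRABALHADORES' in aux:
--             c = aux[-7:].strip().replace('-', '')
--             if c.isdigit():
--                 return c
--         return ''
--
--     candidatas = [l for i, l in enumerate(linhas) if i != 1]
--     cnpj_primeiro = next((c for c in map(cnpj_de, candidatas) if c), '')
--     cnpj_ultimo = next((c for c in map(cnpj_de, reversed(candidatas)) if c), '')
--
--     return ('Relação de Categorias ' + vencimento.replace('/', '-') + ' '
--             + cnpj_primeiro + ' a ' + cnpj_ultimo + '.pdf')
-- ===== Notes on version B (the rewrite author's own statement) =====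
-- stated objective: alternative
-- what changed: B replaces A's single stateful pass (line counter plus first/last CNPJ mutation) by three declarative queries: vencimento read straight off line index 1, the first CNPJ by a lazy forward search, and the last CNPJ by a lazy backward search over the reversed lines.
import Mathlib
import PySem

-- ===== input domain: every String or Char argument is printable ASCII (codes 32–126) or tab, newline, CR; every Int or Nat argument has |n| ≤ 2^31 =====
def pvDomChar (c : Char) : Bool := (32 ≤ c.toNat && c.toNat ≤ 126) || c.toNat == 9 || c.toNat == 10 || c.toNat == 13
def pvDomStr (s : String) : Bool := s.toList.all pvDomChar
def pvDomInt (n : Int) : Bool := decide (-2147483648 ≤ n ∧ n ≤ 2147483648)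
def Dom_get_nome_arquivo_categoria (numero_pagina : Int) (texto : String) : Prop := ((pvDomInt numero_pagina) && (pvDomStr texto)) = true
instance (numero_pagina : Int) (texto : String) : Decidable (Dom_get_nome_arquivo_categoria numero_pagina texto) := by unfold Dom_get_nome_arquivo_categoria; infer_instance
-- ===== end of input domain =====

-- B replaces A's single stateful pass by three declarative queries: vencimento off line 1,
-- first CNPJ by a forward search, last CNPJ by a backward search over the reversed lines.

-- ===== PORT A =====
-- A's loop body (the for-loop becomes a foldl over this step; state = (vencimento, cnpj_primeiro, cnpj_ultimo, cont_linha)).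
def pvStepA (st : String × String × String × Int) (linha : String) : String × String × String × Int :=
  let venc := st.1; let prim := st.2.1; let ult := st.2.2.1; let cont := st.2.2.2
  let elementos := (PySem.Str.split? linha " ").getD []
  if cont == 1 then
    ((PySem.List.pyGet? elementos 0).getD "", prim, ult, cont + 1)
  else
    match PySem.List.pyGet? elementos 1 with
    | none => (venc, prim, ult, cont + 1)  -- Python raises IndexError here; excluded by Pre_
    | some a =>
      let auxiliar := PySem.Str.upper a
      if 0 ≤ PySem.Str.find auxiliar "TRABALHADORES" then
        let cnpj0 := PySem.Str.strip (PySem.Str.slice auxiliar (some (-7)) none)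
        let cnpj := PySem.Str.replace cnpj0 "-" ""
        if PySem.Str.strIsdigit cnpj then
          if prim == "" then (venc, cnpj, cnpj, cont + 1)
          else (venc, prim, cnpj, cont + 1)
        else (venc, prim, ult, cont + 1)
      else (venc, prim, ult, cont + 1)

def get_nome_arquivo_categoria (numero_pagina : Int) (texto : String) : String :=
  let linhas := (PySem.Str.split? texto "\n").getD []
  let r := linhas.foldl pvStepA ("", "", "", 0)
  "Relação de Categorias " ++ PySem.Str.replace r.1 "/" "-" ++ " " ++ r.2.1 ++ " a " ++ r.2.2.1 ++ ".pdf"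

-- ===== PORT B =====
-- Source B's cnpj_de: the CNPJ a line contributes, '' if none
def pvCnpjDe (linha : String) : String :=
  match PySem.List.pyGet? ((PySem.Str.split? linha " ").getD []) 1 with
  | none => ""  -- Python raises IndexError here; inside Pre_ the lazy searches never evaluate such a line
  | some a =>
    let aux := PySem.Str.upper a
    if PySem.Str.isIn "TRABALHADORES" aux then
      let c := PySem.Str.replace (PySem.Str.strip (PySem.Str.slice aux (some (-7)) none)) "-" ""
      if PySem.Str.strIsdigit c then c else ""
    else ""

def get_nome_arquivo_categoria_alt (numero_pagina : Int) (texto : String) : String :=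
  let linhas := (PySem.Str.split? texto "\n").getD []
  let vencimento :=
    match linhas[1]? with
    | some l => ((PySem.Str.split? l " ").getD []).headD ""
    | none => ""
  let candidatas := ((PySem.List.enumerate linhas 0).filter (fun p => p.1 != 1)).map Prod.snd
  let cnpj_primeiro := ((candidatas.map pvCnpjDe).find? (fun c => c != "")).getD ""
  let cnpj_ultimo := ((candidatas.reverse.map pvCnpjDe).find? (fun c => c != "")).getD ""
  "Relação de Categorias " ++ PySem.Str.replace vencimento "/" "-" ++ " " ++ cnpj_primeiro ++ " a " ++ cnpj_ultimo ++ ".pdf"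

-- ===== PRECONDITION & SPEC =====
-- Pre_ excludes exactly the inputs on which Python A raises IndexError: some line other than
-- line index 1 contains no space, so elementos[1] does not exist.
def Pre_get_nome_arquivo_categoria (numero_pagina : Int) (texto : String) : Prop :=
  ((PySem.List.enumerate ((PySem.Str.split? texto "\n").getD []) 0).all
    (fun p => p.1 == 1 || PySem.Str.isIn " " p.2)) = true
instance (numero_pagina : Int) (texto : String) : Decidable (Pre_get_nome_arquivo_categoria numero_pagina texto) := by unfold Pre_get_nome_arquivo_categoria; infer_instance

def pvWitness_get_nome_arquivo_categoria : Int × String := (0, "a b\n01/02 x\nw TRABALHADORES123-4567 z")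

def Spec_get_nome_arquivo_categoria (numero_pagina : Int) (texto : String) (out : String) : Prop := out = get_nome_arquivo_categoria_alt numero_pagina texto
instance (numero_pagina : Int) (texto : String) (out : String) : Decidable (Spec_get_nome_arquivo_categoria numero_pagina texto out) := by unfold Spec_get_nome_arquivo_categoria; infer_instance

-- ===== CLAIM (what is proved, stated in full; the proofs are below) =====
def Claim_equal_get_nome_arquivo_categoria : Prop := ∀ (numero_pagina : Int) (texto : String), Dom_get_nome_arquivo_categoria numero_pagina texto → Pre_get_nome_arquivo_categoria numero_pagina texto → Spec_get_nome_arquivo_categoria numero_pagina texto (get_nome_arquivo_categoria numero_pagina texto)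

-- ===== LEMMAS AND PROOFS =====

-- the option-valued CNPJ of one line (proof-side bridge between the two ports)
def pvCnpjOf (linha : String) : Option String :=
  match PySem.List.pyGet? ((PySem.Str.split? linha " ").getD []) 1 with
  | none => none
  | some a =>
    let auxiliar := PySem.Str.upper a
    if PySem.Str.isIn "TRABALHADORES" auxiliar then
      let cnpj := PySem.Str.replace (PySem.Str.strip (PySem.Str.slice auxiliar (some (-7)) none)) "-" ""
      if PySem.Str.strIsdigit cnpj then some cnpj else none
    else none

-- pvCnpjOf is the option view of Source B's cnpj_de
lemma cnpjOf_eq (x : String) :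
    pvCnpjOf x = if pvCnpjDe x == "" then none else some (pvCnpjDe x) := by
  unfold pvCnpjOf pvCnpjDe
  rcases hg : PySem.List.pyGet? ((PySem.Str.split? x " ").getD []) 1 with _ | a
  · simp [hg]
  · simp only [hg]
    by_cases h1 : PySem.Str.isIn "TRABALHADORES" (PySem.Str.upper a) = true
    · rw [if_pos h1, if_pos h1]
      by_cases h2 : PySem.Str.strIsdigit (PySem.Str.replace (PySem.Str.strip (PySem.Str.slice (PySem.Str.upper a) (some (-7)) none)) "-" "") = true
      · have hne : ¬ ((PySem.Str.replace (PySem.Str.strip (PySem.Str.slice (PySem.Str.upper a) (some (-7)) none)) "-" "") == "") = true := by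
          intro hh
          rw [beq_iff_eq] at hh
          rw [hh] at h2
          exact absurd h2 (by decide)
        rw [if_pos h2, if_pos h2, if_neg hne]
      · rw [if_neg h2, if_neg h2, if_pos (by decide)]
    · rw [if_neg h1, if_neg h1, if_pos (by decide)]

-- the list of valid CNPJs contributed by lines l when the first of them has index n
def pvCollect : List String → Int → List String
  | [], _ => []
  | x :: xs, n => (if n = 1 then [] else (pvCnpjOf x).toList) ++ pvCollect xs (n + 1)

-- the lines of l (first index n) other than index 1
def pvCand : List String → Int → List String
  | [], _ => []
  | x :: xs, n => (if n = 1 then [] else [x]) ++ pvCand xs (n + 1)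

-- the final vencimento after processing lines l starting at index n, with current value v
def pvVenc : List String → Int → String → String
  | [], _, v => v
  | x :: xs, n, v =>
      pvVenc xs (n + 1)
        (if n = 1 then (PySem.List.pyGet? ((PySem.Str.split? x " ").getD []) 0).getD "" else v)

lemma cnpjOf_ne_empty {x c : String} (h : pvCnpjOf x = some c) : c ≠ "" := by
  rw [cnpjOf_eq] at h
  split_ifs at h with h1
  simp only [Option.some.injEq] at h
  subst h
  simpa using h1

lemma stepA_else (venc prim ult : String) (n : Int) (x : String) (hn : ¬ n = 1) :
    pvStepA (venc, prim, ult, n) x =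
      (match pvCnpjOf x with
        | none => (venc, prim, ult, n + 1)
        | some c => (venc, if prim == "" then c else prim, c, n + 1)) := by
  unfold pvStepA pvCnpjOf
  simp only [beq_iff_eq, hn, if_false]
  rcases hg : PySem.List.pyGet? ((PySem.Str.split? x " ").getD []) 1 with _ | a
  · rfl
  · simp only
    have hfi : (0 ≤ PySem.Str.find (PySem.Str.upper a) "TRABALHADORES") ↔
        (PySem.Str.isIn "TRABALHADORES" (PySem.Str.upper a) = true) := by
      rw [PySem.Str.isIn_iff_infix, ← PySem.Str.find_nonneg_iff]
    by_cases hf : 0 ≤ PySem.Str.find (PySem.Str.upper a) "TRABALHADORES"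
    · rw [if_pos hf, if_pos (hfi.mp hf)]
      split_ifs <;> rfl
    · rw [if_neg hf, if_neg (fun h => hf (hfi.mpr h))]

lemma headD_concat (acc : List String) (c : String) (hmem : "" ∉ acc) :
    (acc ++ [c]).headD "" = (if acc.headD "" == "" then c else acc.headD "") := by
  cases acc with
  | nil => simp
  | cons a as =>
    have : a ≠ "" := fun h => hmem (h ▸ List.mem_cons_self ..)
    simp [this]

lemma foldA (l : List String) :
    ∀ (n : Int) (venc : String) (acc : List String), "" ∉ acc →
      l.foldl pvStepA (venc, acc.headD "", acc.getLastD "", n) =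
        (pvVenc l n venc, (acc ++ pvCollect l n).headD "",
          (acc ++ pvCollect l n).getLastD "", n + l.length) := by
  induction l with
  | nil => intro n venc acc _; simp [pvVenc, pvCollect]
  | cons x xs ih =>
    intro n venc acc hmem
    by_cases hn : n = 1
    · subst hn
      have h1 : pvStepA (venc, acc.headD "", acc.getLastD "", 1) x =
          ((PySem.List.pyGet? ((PySem.Str.split? x " ").getD []) 0).getD "",
            acc.headD "", acc.getLastD "", (1 : Int) + 1) := by
        unfold pvStepA; simp
      rw [List.foldl_cons, h1, ih (1 + 1) _ acc hmem]
      simp only [pvVenc, pvCollect, List.length_cons, Prod.mk.injEq]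
      refine ⟨rfl, rfl, rfl, by push_cast; omega⟩
    · rw [List.foldl_cons, stepA_else _ _ _ _ _ hn]
      rcases hc : pvCnpjOf x with _ | c
      · simp only
        rw [ih (n + 1) venc acc hmem]
        simp only [pvVenc, pvCollect, if_neg hn, hc, Option.toList_none, List.nil_append,
          List.length_cons, Prod.mk.injEq]
        refine ⟨trivial, trivial, trivial, by push_cast; omega⟩
      · simp only
        have hcne : c ≠ "" := cnpjOf_ne_empty hc
        have hmem' : "" ∉ acc ++ [c] := by
          intro h; rcases List.mem_append.mp h with h | h
          · exact hmem h
          · exact hcne (List.mem_singleton.mp h).symm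
        have ih' := ih (n + 1) venc (acc ++ [c]) hmem'
        rw [headD_concat acc c hmem] at ih'
        rw [(show (acc ++ [c]).getLastD "" = c by simp)] at ih'
        rw [ih']
        simp only [pvVenc, pvCollect, if_neg hn, hc, Option.toList_some, List.append_assoc,
          List.cons_append, List.nil_append, List.length_cons, Prod.mk.injEq]
        refine ⟨trivial, trivial, trivial, by push_cast; omega⟩

lemma pvVenc_const (l : List String) : ∀ (n : Int) (v : String), 2 ≤ n → pvVenc l n v = v := by
  induction l with
  | nil => intro n v _; rfl
  | cons x xs ih =>
    intro n v hn
    have : ¬ n = 1 := by omega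
    simp only [pvVenc, if_neg this]
    exact ih (n + 1) v (by omega)

lemma getD_zero_headD (xs : List String) : (PySem.List.pyGet? xs 0).getD "" = xs.headD "" := by
  cases xs <;> simp [PySem.List.pyGet?, PySem.List.pyIdx?]

lemma pvVenc_zero (l : List String) :
    pvVenc l 0 "" = (match l[1]? with
      | some y => ((PySem.Str.split? y " ").getD []).headD ""
      | none => "") := by
  match l with
  | [] => rfl
  | [x] => simp [pvVenc]
  | x :: y :: ys =>
    simp only [pvVenc]
    rw [if_pos (by norm_num : (0 : Int) + 1 = 1), pvVenc_const ys (0 + 1 + 1) _ (by norm_num),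
      getD_zero_headD]
    simp

lemma foldA0 (l : List String) :
    l.foldl pvStepA ("", "", "", 0) =
      (pvVenc l 0 "", (pvCollect l 0).headD "", (pvCollect l 0).getLastD "", (l.length : Int)) := by
  have h := foldA l 0 "" [] (by simp)
  simpa using h

-- B's candidate list is pvCand
lemma enum_filter (l : List String) :
    ∀ (n : Int), ((PySem.List.enumerate l n).filter (fun p => p.1 != 1)).map Prod.snd = pvCand l n := by
  induction l with
  | nil => intro n; simp [PySem.List.enumerate_nil, pvCand]
  | cons x xs ih =>
    intro n
    rw [PySem.List.enumerate_cons]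
    by_cases hn : n = 1
    · subst hn
      rw [List.filter_cons, if_neg (by simp)]
      show _ = pvCand (x :: xs) 1
      simp only [pvCand, if_pos rfl, List.nil_append]
      exact ih (1 + 1)
    · rw [List.filter_cons, if_pos (by simpa using hn), List.map_cons]
      simp only [pvCand, if_neg hn, List.singleton_append, List.cons.injEq]
      exact ⟨trivial, ih (n + 1)⟩

-- pvCollect is the filtered map of pvCnpjDe over the candidates
lemma collect_eq_filter (l : List String) :
    ∀ (n : Int), pvCollect l n = ((pvCand l n).map pvCnpjDe).filter (fun c => c != "") := by
  induction l with
  | nil => intro n; rfl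
  | cons x xs ih =>
    intro n
    by_cases hn : n = 1
    · simp only [pvCollect, pvCand, if_pos hn, List.nil_append, List.map_nil, List.filter_nil]
      exact ih (n + 1)
    · simp only [pvCollect, pvCand, if_neg hn, List.singleton_append, List.map_cons,
        List.filter_cons]
      rw [cnpjOf_eq]
      by_cases he : (pvCnpjDe x == "") = true
      · rw [if_pos he]
        have hb : (pvCnpjDe x != "") = false := by simp [bne, he]
        rw [hb, if_neg (by simp), Option.toList_none, List.nil_append]
        exact ih (n + 1)
      · rw [if_neg he]
        have hb : (pvCnpjDe x != "") = true := by simp [bne, he]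
        rw [hb, if_pos rfl, Option.toList_some, List.singleton_append]
        exact congrArg _ (ih (n + 1))

lemma find?_eq_head?_filter {α : Type} (p : α → Bool) (l : List α) :
    l.find? p = (l.filter p).head? := by
  induction l with
  | nil => rfl
  | cons x xs ih =>
    by_cases h : p x = true
    · simp [h]
    · simp only [List.find?_cons, h, if_false, List.filter_cons, Bool.false_eq_true]
      simpa [h] using ih

-- ===== VERDICT (by name: the statement is the Claim_ definition above) =====
theorem get_nome_arquivo_categoria_spec : Claim_equal_get_nome_arquivo_categoria := by
  intro numero_pagina texto _ _
  simp only [Spec_get_nome_arquivo_categoria, get_nome_arquivo_categoria,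
    get_nome_arquivo_categoria_alt]
  rw [foldA0]
  simp only
  rw [pvVenc_zero, enum_filter, collect_eq_filter]
  rw [find?_eq_head?_filter, find?_eq_head?_filter, List.map_reverse, List.filter_reverse,
    List.head?_reverse]
  cases h : ((pvCand ((PySem.Str.split? texto "\n").getD []) 0).map pvCnpjDe).filter (fun c => c != "") with
  | nil => simp
  | cons a as => simp [List.headD_eq_head?_getD, List.getLastD_eq_getLast?]
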